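-- pv_equiv track=rewrite | github.com/srihariprasad-r/workable-code | 500_Practise Problems/largest_subarray_contiguous.py | longerSubArray
-- ===== SOURCE A (Python) =====
-- def longerSubArray(array,n):
--     array_len = 0
--     for i in range(n-1):
--         mx = mn = array[i]
--         for j in range(i+1,n):
--             mx = max(mx, array[j])
--             mn = min(mn, array[j])
--
--             if ((mx - mn) == j-i):
--                 array_len = max(array_len, mx-mn+1)
--     return array_len
-- ===== SOURCE B (Python) =====
-- def longerSubArray(array, n):
--     array_len = 0
--     for i in range(n - 1):
--         for j in range(i + 1, n):
--             window = array[i:j + 1]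
--             if max(window) - min(window) == j - i:
--                 array_len = max(array_len, j - i + 1)
--     return array_len
-- ===== Notes on version B (the rewrite author's own statement) =====
-- stated objective: simpler
-- what changed: B drops A's incremental running mx/mn state and instead tests each window directly with max/min over a slice, trading the O(n^2) incremental scan for a plainer O(n^3) window rescan.
import Mathlib
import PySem

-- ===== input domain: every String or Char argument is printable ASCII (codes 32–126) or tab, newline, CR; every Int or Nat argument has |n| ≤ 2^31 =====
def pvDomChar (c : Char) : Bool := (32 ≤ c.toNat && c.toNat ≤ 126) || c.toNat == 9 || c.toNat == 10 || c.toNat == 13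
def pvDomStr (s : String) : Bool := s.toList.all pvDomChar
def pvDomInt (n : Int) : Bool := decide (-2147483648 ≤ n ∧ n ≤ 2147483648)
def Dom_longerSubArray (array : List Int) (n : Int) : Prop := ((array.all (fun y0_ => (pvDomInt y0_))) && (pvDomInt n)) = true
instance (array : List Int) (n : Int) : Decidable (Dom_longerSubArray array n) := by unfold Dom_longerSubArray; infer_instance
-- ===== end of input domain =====

-- B drops A's incremental running mx/mn state and tests each window directly with max/min on a slice (plainer, O(n^3) vs O(n^2), not faster).

-- ===== PORT A =====
-- A: for i in range(n-1): keep running mx/mn over array[i..j]; state is (mx, mn, array_len)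
def longerSubArray (array : List Int) (n : Int) : Int :=
  ((PySem.List.pyRange 0 (n - 1) 1).foldl (fun acc i =>
    let ai := PySem.List.pyGetD array i 0   -- array[i]; Pre_ keeps the index in range
    ((PySem.List.pyRange (i + 1) n 1).foldl (fun (st : Int × Int × Int) j =>
      let aj := PySem.List.pyGetD array j 0   -- array[j]; Pre_ keeps the index in range
      let mx := max st.1 aj
      let mn := min st.2.1 aj
      (mx, mn, if mx - mn = j - i then max st.2.2 (mx - mn + 1) else st.2.2))
      (ai, ai, acc)).2.2) 0)

-- ===== PORT B =====
-- B: window = array[i:j+1]; max(window)/min(window); Pre_ keeps the window nonempty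
def longerSubArray_alt (array : List Int) (n : Int) : Int :=
  ((PySem.List.pyRange 0 (n - 1) 1).foldl (fun best i =>
    ((PySem.List.pyRange (i + 1) n 1).foldl (fun best j =>
      let window := PySem.List.slice array (some i) (some (j + 1))
      let mx := (PySem.List.max? window (fun x => x)).getD 0
      let mn := (PySem.List.min? window (fun x => x)).getD 0
      if mx - mn = j - i then max best (j - i + 1) else best) best)) 0)

-- ===== PRECONDITION & SPEC =====
-- Pre_ excludes exactly the inputs where A raises IndexError: n ≥ 2 with n > len(array).
def Pre_longerSubArray (array : List Int) (n : Int) : Prop :=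
  n ≤ 1 ∨ n ≤ array.length
instance (array : List Int) (n : Int) : Decidable (Pre_longerSubArray array n) := by
  unfold Pre_longerSubArray; infer_instance
def pvWitness_longerSubArray : List Int × Int := ([1, 3, 2, 7], 4)

def Spec_longerSubArray (array : List Int) (n : Int) (out : Int) : Prop := out = longerSubArray_alt array n
instance (array : List Int) (n : Int) (out : Int) : Decidable (Spec_longerSubArray array n out) := by unfold Spec_longerSubArray; infer_instance

-- ===== CLAIM (what is proved, stated in full; the proofs are below) =====
def Claim_equal_longerSubArray : Prop := ∀ (array : List Int) (n : Int), Dom_longerSubArray array n → Pre_longerSubArray array n → Spec_longerSubArray array n (longerSubArray array n)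

-- ===== LEMMAS AND PROOFS =====

lemma slice_snoc (xs : List Int) (a b : Int) (ha : 0 ≤ a) (hab : a ≤ b)
    (hb : b < xs.length) :
    PySem.List.slice xs (some a) (some (b + 1)) =
      PySem.List.slice xs (some a) (some b) ++ [PySem.List.pyGetD xs b 0] := by
  rw [PySem.List.slice_toNat xs ha (by omega), PySem.List.slice_toNat xs ha (by omega)]
  have h1 : (b+1).toNat - a.toNat = (b.toNat - a.toNat) + 1 := by omega
  rw [h1, List.take_add_one]
  congr 1
  have hq : a.toNat + (b.toNat - a.toNat) = b.toNat := by omega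
  rw [List.getElem?_drop, hq, List.getElem?_eq_getElem (by omega),
      PySem.List.pyGetD_eq_getElem xs 0 (by omega) hb]
  simp

lemma slice_cons (xs : List Int) (a b : Int) (ha : 0 ≤ a) (hab : a < b)
    (haL : a < xs.length) :
    PySem.List.slice xs (some a) (some b) =
      PySem.List.pyGetD xs a 0 :: PySem.List.slice xs (some (a + 1)) (some b) := by
  rw [PySem.List.slice_toNat xs ha (by omega), PySem.List.slice_toNat xs (by omega) (by omega)]
  rw [List.drop_eq_getElem_cons (by omega : a.toNat < xs.length)]
  have h1 : b.toNat - a.toNat = (b.toNat - (a+1).toNat) + 1 := by omega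
  have h2 : (a+1).toNat = a.toNat + 1 := by omega
  rw [h1, List.take_succ_cons, h2, PySem.List.pyGetD_eq_getElem xs 0 ha haL]

lemma inner_eq (array : List Int) (i : Int) (hi : 0 ≤ i) (hiL : i < array.length)
    (m : Int) (him : i + 1 ≤ m) (hm : m ≤ array.length) (acc : Int) :
    ((PySem.List.pyRange (i + 1) m 1).foldl (fun (st : Int × Int × Int) j =>
      let aj := PySem.List.pyGetD array j 0
      let mx := max st.1 aj
      let mn := min st.2.1 aj
      (mx, mn, if mx - mn = j - i then max st.2.2 (mx - mn + 1) else st.2.2))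
      (PySem.List.pyGetD array i 0, PySem.List.pyGetD array i 0, acc))
    = ((PySem.List.slice array (some (i + 1)) (some m)).foldl max (PySem.List.pyGetD array i 0),
       (PySem.List.slice array (some (i + 1)) (some m)).foldl min (PySem.List.pyGetD array i 0),
       (PySem.List.pyRange (i + 1) m 1).foldl (fun best j =>
         let window := PySem.List.slice array (some i) (some (j + 1))
         let mx := (PySem.List.max? window (fun x => x)).getD 0
         let mn := (PySem.List.min? window (fun x => x)).getD 0
         if mx - mn = j - i then max best (j - i + 1) else best) acc) := by
  obtain ⟨k, rfl⟩ : ∃ k : Nat, m = (i+1) + k := ⟨(m-(i+1)).toNat, by omega⟩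
  clear him
  induction k with
  | zero =>
    have h0 : (i:Int)+1+((0:Nat):Int) = i+1 := by push_cast; ring
    rw [h0, PySem.List.pyRange_one_eq_nil le_rfl,
        PySem.List.slice_toNat array (by omega : (0:Int) ≤ i+1) (by omega : (0:Int) ≤ i+1)]
    simp
  | succ k ih =>
    have hm' : (i:Int) + 1 + k ≤ array.length := by push_cast at hm ⊢; omega
    have hjk : (i:Int) + 1 + k < array.length := by push_cast at hm; omega
    have hcast : (i:Int) + 1 + ((k:Nat)+1 : Nat) = ((i+1+(k:Int)) + 1) := by push_cast; ring
    rw [hcast, PySem.List.pyRange_one_succ_right (by omega), List.foldl_append, List.foldl_append,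
        ih hm']
    set j0 : Int := i + 1 + k with hj0
    simp only [List.foldl_cons, List.foldl_nil]
    rw [slice_snoc array (i+1) j0 (by omega) (by omega) hjk]
    rw [slice_cons array i (j0+1) hi (by omega) hiL]
    rw [slice_snoc array (i+1) j0 (by omega) (by omega) hjk]
    simp only [List.foldl_append, List.foldl_cons, List.foldl_nil,
      PySem.List.max?_id_cons, PySem.List.min?_id_cons, Option.getD_some]
    set ai := PySem.List.pyGetD array i 0
    set aj := PySem.List.pyGetD array j0 0
    set L := PySem.List.slice array (some (i+1)) (some j0)
    split_ifs with h
    · simp [h]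
    · rfl

-- ===== VERDICT (by name: the statement is the Claim_ definition above) =====
theorem longerSubArray_spec : Claim_equal_longerSubArray := by
  intro array n _ hpre
  unfold Spec_longerSubArray longerSubArray longerSubArray_alt
  apply PySem.List.foldl_congr_mem
  intro acc i hiMem
  rw [PySem.List.mem_pyRange_one] at hiMem
  have hn : n ≤ (array.length : Int) := by
    rcases hpre with h | h
    · omega
    · exact_mod_cast h
  have hkey := inner_eq array i hiMem.1 (by omega) n (by omega) hn acc
  simp only []
  rw [hkey]
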